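-- pv_equiv track=rewrite | github.com/modbender/skill-library-mcp | skills/context-restore/scripts/restore_context.py | format_for_whatsapp
-- ===== SOURCE A (Python) =====
-- def format_for_whatsapp(content: str) -> str:
--     """
--     优化 WhatsApp 消息格式
--
--     WhatsApp 不支持 Markdown 表格。
--     建议使用纯文本列表和 **粗体**。
--
--     Args:
--         content: 原始内容
--
--     Returns:
--         WhatsApp 友好格式的内容
--     """
--     if not content:
--         return content
--
--     result = content
--
--     # 移除表格（转换为纯文本列表）
--     import re
--
--     lines = result.split('\n')
--     result_lines = []
--     in_table = False
--
--     for line in lines: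
--         if '|' in line and not line.strip().startswith('-'):
--             if not in_table:
--                 in_table = True
--                 result_lines.append('')
--             cells = [c.strip() for c in line.split('|') if c.strip()]
--             result_lines.append(' • '.join(cells))
--         else:
--             in_table = False
--             result_lines.append(line)
--
--     result = '\n'.join(result_lines)
--
--     return result
-- ===== SOURCE B (Python) =====
-- def _is_table(line):
--     return '|' in line and not line.strip().startswith('-')
--
--
-- def _runs(lines):
--     """Split lines into maximal consecutive runs sharing the same _is_table value."""
--     if not lines:
--         return []
--     k = _is_table(lines[0])
--     j = 1
--     while j < len(lines) and _is_table(lines[j]) == k: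
--         j += 1
--     return [(k, lines[:j])] + _runs(lines[j:])
--
--
-- def format_for_whatsapp(content: str) -> str:
--     if not content:
--         return content
--     out = []
--     for is_tbl, run in _runs(content.split('\n')):
--         if is_tbl:
--             out.append('')
--             for line in run:
--                 out.append(' • '.join([c.strip() for c in line.split('|') if c.strip()]))
--         else:
--             out.extend(run)
--     return '\n'.join(out)
-- ===== Notes on version B (the rewrite author's own statement) =====
-- stated objective: alternative
-- what changed: B replaces A's stateful line-by-line scan with an in_table flag by a group-then-render decomposition: it first splits the lines into maximal consecutive runs by the table predicate, then renders each table run as a block (one blank line plus the bulleted rows) and copies non-table runs unchanged.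
import Mathlib
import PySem

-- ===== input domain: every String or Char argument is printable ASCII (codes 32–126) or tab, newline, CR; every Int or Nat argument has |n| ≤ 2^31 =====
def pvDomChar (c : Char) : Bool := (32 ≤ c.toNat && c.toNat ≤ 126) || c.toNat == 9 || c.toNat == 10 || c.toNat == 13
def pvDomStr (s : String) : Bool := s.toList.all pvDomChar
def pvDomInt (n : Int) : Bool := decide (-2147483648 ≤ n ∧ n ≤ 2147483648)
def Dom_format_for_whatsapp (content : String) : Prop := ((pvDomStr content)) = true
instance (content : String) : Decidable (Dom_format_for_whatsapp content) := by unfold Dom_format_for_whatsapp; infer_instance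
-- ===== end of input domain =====

-- B replaces A's stateful line-by-line scan (in_table flag) by a group-then-render
-- decomposition: split the lines into maximal consecutive runs by the table predicate,
-- then render each run as a block; alternative decomposition, same cost.

-- shared helpers: the table-line predicate and the cell rendering, literal from both Pythons
def pvIsTable (line : String) : Bool :=
  PySem.Str.isIn "|" line && !(PySem.Str.startswith (PySem.Str.strip line) "-")

-- ' • '.join([c.strip() for c in line.split('|') if c.strip()])
def pvRender (line : String) : String :=
  PySem.Str.join " • "
    ((((PySem.Str.split? line "|").getD []).filter
        (fun c => !(PySem.Str.strip c == ""))).map PySem.Str.strip)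

-- ===== PORT A =====
-- loop body of A's for-line scan; state = (in_table, result_lines)
def pvStepA (st : Bool × List String) (line : String) : Bool × List String :=
  if pvIsTable line then
    let st' := if !st.1 then (true, st.2 ++ [""]) else st
    (true, st'.2 ++ [pvRender line])
  else
    (false, st.2 ++ [line])

def format_for_whatsapp (content : String) : String :=
  if content = "" then content
  else
    let lines := (PySem.Str.split? content "\n").getD []
    let res := lines.foldl pvStepA (false, [])
    PySem.Str.join "\n" res.2

-- ===== PORT B =====
-- _runs: maximal consecutive runs of lines sharing the same pvIsTable value
def pvRuns : List String → List (Bool × List String)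
  | [] => []
  | l :: ls =>
    let k := pvIsTable l
    (k, l :: ls.takeWhile (fun x => pvIsTable x == k)) ::
      pvRuns (ls.dropWhile (fun x => pvIsTable x == k))
termination_by lines => lines.length
decreasing_by
  simp only [List.length_cons]
  exact Nat.lt_succ_of_le (List.length_dropWhile_le _ _)

-- per-run rendering of B's outer loop
def pvStepB (out : List String) (r : Bool × List String) : List String :=
  if r.1 then (out ++ [""]) ++ r.2.map pvRender else out ++ r.2

def format_for_whatsapp_alt (content : String) : String :=
  if content = "" then content
  else
    PySem.Str.join "\n"
      ((pvRuns ((PySem.Str.split? content "\n").getD [])).foldl pvStepB [])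

-- ===== PRECONDITION & SPEC =====
def Spec_format_for_whatsapp (content : String) (out : String) : Prop := out = format_for_whatsapp_alt content
instance (content : String) (out : String) : Decidable (Spec_format_for_whatsapp content out) := by unfold Spec_format_for_whatsapp; infer_instance

-- ===== CLAIM (what is proved, stated in full; the proofs are below) =====
def Claim_equal_format_for_whatsapp : Prop := ∀ (content : String), Dom_format_for_whatsapp content → Spec_format_for_whatsapp content (format_for_whatsapp content)

-- ===== LEMMAS AND PROOFS =====

-- a run of table lines, entered with in_table = true, just renders each line
lemma pvFoldA_table (run : List String) (acc : List String)
    (h : ∀ x ∈ run, pvIsTable x = true) :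
    run.foldl pvStepA (true, acc) = (true, acc ++ run.map pvRender) := by
  induction run generalizing acc with
  | nil => simp
  | cons a t ih =>
    have ha : pvIsTable a = true := h a (by simp)
    have hstep : pvStepA (true, acc) a = (true, acc ++ [pvRender a]) := by
      simp [pvStepA, ha]
    rw [List.foldl_cons, hstep, ih _ (fun x hx => h x (by simp [hx]))]
    simp

-- a run of non-table lines, entered with in_table = false, copies the lines
lemma pvFoldA_plain (run : List String) (acc : List String)
    (h : ∀ x ∈ run, pvIsTable x = false) :
    run.foldl pvStepA (false, acc) = (false, acc ++ run) := by
  induction run generalizing acc with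
  | nil => simp
  | cons a t ih =>
    have ha : pvIsTable a = false := h a (by simp)
    have hstep : pvStepA (false, acc) a = (false, acc ++ [a]) := by
      simp [pvStepA, ha]
    rw [List.foldl_cons, hstep, ih _ (fun x hx => h x (by simp [hx]))]
    simp

-- the incoming in_table flag is irrelevant when the next line is not a table line
lemma pvFoldA_state_irrel (rest : List String) (acc : List String)
    (h : ∀ x, rest.head? = some x → pvIsTable x = false) :
    (rest.foldl pvStepA (true, acc)).2 = (rest.foldl pvStepA (false, acc)).2 := by
  cases rest with
  | nil => rfl
  | cons a t =>
    have ha : pvIsTable a = false := h a rfl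
    simp only [List.foldl_cons, pvStepA, ha, Bool.false_eq_true, if_false]

lemma head?_dropWhile_false {α : Type} (p : α → Bool) (ls : List α) :
    ∀ x, (ls.dropWhile p).head? = some x → p x = false := by
  induction ls with
  | nil => intro x hx; simp at hx
  | cons a t ih =>
    intro x hx
    by_cases hpa : p a = true
    · rw [List.dropWhile_cons_of_pos hpa] at hx; exact ih x hx
    · rw [List.dropWhile_cons_of_neg hpa] at hx
      simp at hx
      subst hx
      simpa using hpa

-- main invariant: A's scan from in_table = false produces B's run-rendered output
lemma pvKey : ∀ (lines acc : List String),
    (lines.foldl pvStepA (false, acc)).2 = (pvRuns lines).foldl pvStepB acc := by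
  intro lines
  induction lines using pvRuns.induct with
  | case1 => intro acc; simp [pvRuns]
  | case2 l ls k ih =>
    intro acc
    rw [pvRuns]
    by_cases hk : pvIsTable l = true
    · -- table run
      have hstep : pvStepA (false, acc) l = (true, (acc ++ [""]) ++ [pvRender l]) := by
        simp [pvStepA, hk]
      rw [List.foldl_cons, hstep]
      conv_lhs => rw [← List.takeWhile_append_dropWhile (p := fun x => pvIsTable x == k) (l := ls)]
      rw [List.foldl_append]
      rw [pvFoldA_table _ _ (by
        intro x hx
        have := List.mem_takeWhile_imp hx
        simp only [k, hk] at this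
        simpa using this)]
      rw [pvFoldA_state_irrel _ _ (by
        intro x hx
        have := head?_dropWhile_false (fun x => pvIsTable x == k) ls x hx
        simp only [k, hk] at this
        simpa using this)]
      rw [ih]
      simp only [List.foldl_cons, pvStepB, k, hk]
      simp
    · -- non-table run
      have hk' : pvIsTable l = false := by simpa using hk
      have hstep : pvStepA (false, acc) l = (false, acc ++ [l]) := by
        simp [pvStepA, hk']
      rw [List.foldl_cons, hstep]
      conv_lhs => rw [← List.takeWhile_append_dropWhile (p := fun x => pvIsTable x == k) (l := ls)]
      rw [List.foldl_append]
      rw [pvFoldA_plain _ _ (by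
        intro x hx
        have := List.mem_takeWhile_imp hx
        simp only [k, hk', beq_iff_eq] at this
        exact this)]
      rw [ih]
      simp only [List.foldl_cons, pvStepB, k, hk', Bool.false_eq_true, if_false]
      simp

-- ===== VERDICT (by name: the statement is the Claim_ definition above) =====
theorem format_for_whatsapp_spec : Claim_equal_format_for_whatsapp := by
  intro content _
  unfold Spec_format_for_whatsapp format_for_whatsapp format_for_whatsapp_alt
  by_cases h : content = ""
  · simp [h]
  · simp only [h, if_false]
    rw [pvKey]
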